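-- pv_equiv track=rewrite | github.com/irintai-iatniri/srt_library | core/nn/layers/prime_syntony_gate.py | get_stable_dimensions
-- ===== SOURCE A (Python) =====
-- def get_stable_dimensions(max_dim: int = 128) -> list:
--     """
--     Get all Mersenne prime dimensions up to max_dim.
--     These are the "stable" dimensions for SRT neural networks.
--     """
--     mersenne_primes = []
--     p = 2
--     while True:
--         mp = (1 << p) - 1
--         if mp > max_dim:
--             break
--         mersenne_primes.append(mp)
--         p += 1
--     return mersenne_primes
-- ===== SOURCE B (Python) =====
-- def get_stable_dimensions(max_dim: int = 128) -> list:
--     """Find the largest all-ones value <= max_dim in closed form, then build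
--     the list back-to-front by recursive halving: (v-1)//2 strips one bit."""
--     def down(v):
--         return down((v - 1) // 2) + [v] if v >= 3 else []
--     top = (1 << max(max_dim + 1, 0).bit_length()) // 2 - 1
--     return down(top)
-- ===== Notes on version B (the rewrite author's own statement) =====
-- stated objective: alternative
-- what changed: Instead of ascending p and testing each 2^p-1 against max_dim, B computes the largest all-ones value below max_dim in closed form via bit_length, then reconstructs the list back-to-front by recursive halving ((v-1)//2 strips the low bit).
import Mathlib
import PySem

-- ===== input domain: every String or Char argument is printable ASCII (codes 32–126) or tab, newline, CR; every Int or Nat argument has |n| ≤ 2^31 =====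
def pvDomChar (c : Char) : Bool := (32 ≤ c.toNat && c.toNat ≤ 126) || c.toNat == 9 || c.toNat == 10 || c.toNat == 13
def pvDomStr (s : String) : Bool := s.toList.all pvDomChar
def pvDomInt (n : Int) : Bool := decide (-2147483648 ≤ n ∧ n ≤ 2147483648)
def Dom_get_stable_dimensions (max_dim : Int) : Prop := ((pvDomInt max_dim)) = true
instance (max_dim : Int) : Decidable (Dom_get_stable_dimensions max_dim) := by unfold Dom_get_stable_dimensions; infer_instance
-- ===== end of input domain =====

-- B replaces A's ascending test-each-candidate loop by a closed-form top value
-- (bit_length) followed by a recursive descent that builds the list back-to-front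
-- by halving; objective: alternative algorithm (no speed claim).

-- ===== PORT A =====
-- A's `while True` loop: p starts at 2, appends 2^p-1 while it is ≤ max_dim.
def pvLoopA (max_dim : Int) (p : Nat) : List Int :=
  let mp : Int := 2 ^ p - 1
  if mp > max_dim then [] else mp :: pvLoopA max_dim (p + 1)
termination_by (max_dim + 2 - 2 ^ p).toNat
decreasing_by
  have h1 : (1 : Int) ≤ 2 ^ p := one_le_pow₀ (by norm_num)
  omega

def get_stable_dimensions (max_dim : Int) : List Int := pvLoopA max_dim 2

-- ===== PORT B =====
-- Source B's inner helper `down`: recursive descent, (v-1)//2 strips the low bit,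
-- list built back-to-front.  `//` is PySem.Int.floordiv (exact).
def pvDown (v : Int) : List Int :=
  if _h : 3 ≤ v then pvDown (PySem.Int.floordiv (v - 1) 2) ++ [v] else []
termination_by v.toNat
decreasing_by
  rw [PySem.Int.floordiv_eq_ediv_of_pos (by norm_num)]
  omega

-- Source B: top = (1 << max(max_dim+1,0).bit_length()) // 2 - 1; return down(top).
-- bit_length of a nonnegative int is Nat.size of its Nat value (exact).
def get_stable_dimensions_alt (max_dim : Int) : List Int :=
  let top : Int :=
    PySem.Int.floordiv (2 ^ Nat.size (max (max_dim + 1) 0).toNat) 2 - 1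
  pvDown top

-- ===== PRECONDITION & SPEC =====
def Spec_get_stable_dimensions (max_dim : Int) (out : List Int) : Prop := out = get_stable_dimensions_alt max_dim
instance (max_dim : Int) (out : List Int) : Decidable (Spec_get_stable_dimensions max_dim out) := by unfold Spec_get_stable_dimensions; infer_instance

-- ===== CLAIM (what is proved, stated in full; the proofs are below) =====
def Claim_equal_get_stable_dimensions : Prop := ∀ (max_dim : Int), Dom_get_stable_dimensions max_dim → Spec_get_stable_dimensions max_dim (get_stable_dimensions max_dim)

-- ===== LEMMAS AND PROOFS =====

-- A's loop continuation test is exactly "p below the bit_length bound".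
theorem pv_key_iff (max_dim : Int) (p : Nat) :
    ((2 : Int) ^ p - 1 ≤ max_dim) ↔ p < Nat.size (max (max_dim + 1) 0).toNat := by
  rw [Nat.lt_size]
  have h1 : (1 : Int) ≤ 2 ^ p := one_le_pow₀ (by norm_num)
  have h2 : ((2 ^ p : Nat) : Int) = (2 : Int) ^ p := by push_cast; ring
  constructor
  · intro h
    have hb : (0 : Int) ≤ max (max_dim + 1) 0 := le_max_right _ _
    have : (2 : Int) ^ p ≤ max (max_dim + 1) 0 := le_max_of_le_left (by omega)
    omega
  · intro h
    have hcast : ((2 ^ p : Nat) : Int) ≤ ((max (max_dim + 1) 0).toNat : Int) :=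
      Int.ofNat_le.mpr h
    have hle : ((max (max_dim + 1) 0).toNat : Int) = max (max_dim + 1) 0 :=
      Int.toNat_of_nonneg (le_max_right _ _)
    have hm : max (max_dim + 1) 0 ≤ max_dim + 1 ∨ max (max_dim + 1) 0 = 0 := by
      rcases max_choice (max_dim + 1) (0 : Int) with hc | hc <;> simp [hc]
    omega

-- A's loop, from exponent p on, lists 2^q-1 for q in [p, bit_length bound).
theorem pv_loop_eq (max_dim : Int) :
    ∀ (n p : Nat), Nat.size (max (max_dim + 1) 0).toNat ≤ p + n →
      pvLoopA max_dim p =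
        (PySem.List.pyRange (p : Int) (Nat.size (max (max_dim + 1) 0).toNat : Int) 1).map
          (fun q => 2 ^ q.toNat - 1) := by
  intro n
  induction n with
  | zero =>
    intro p hp
    rw [pvLoopA]
    rw [if_pos (by have := (pv_key_iff max_dim p).not; omega)]
    rw [PySem.List.pyRange_one_eq_nil (by exact_mod_cast Nat.add_zero _ ▸ hp)]
    rfl
  | succ n ih =>
    intro p hp
    by_cases hlt : p < Nat.size (max (max_dim + 1) 0).toNat
    · rw [pvLoopA]
      rw [if_neg (by have := (pv_key_iff max_dim p).mpr hlt; omega)]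
      rw [PySem.List.pyRange_one_cons (by exact_mod_cast hlt)]
      rw [List.map_cons]
      have hcast : ((p : Int) + 1) = ((p + 1 : Nat) : Int) := by push_cast; ring
      rw [hcast, ih (p + 1) (by omega)]
      simp
    · rw [pvLoopA]
      rw [if_pos (by have := (pv_key_iff max_dim p).not; omega)]
      rw [PySem.List.pyRange_one_eq_nil (by exact_mod_cast Nat.le_of_not_lt hlt)]
      rfl

-- B's descent from 2^m-1 lists 2^q-1 for q in [2, m+1), back-to-front.
theorem pv_down_pow : ∀ (m : Nat),
    pvDown ((2 : Int) ^ m - 1) =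
      (PySem.List.pyRange 2 ((m : Int) + 1) 1).map (fun q => 2 ^ q.toNat - 1) := by
  intro m
  induction m with
  | zero =>
    rw [pvDown, dif_neg (by norm_num), PySem.List.pyRange_one_eq_nil (by norm_num)]
    rfl
  | succ m ih =>
    by_cases hm : 1 ≤ m
    · have hpow : (2 : Int) ^ m ≥ 2 := by
        calc (2 : Int) ^ 1 ≤ 2 ^ m := pow_le_pow_right₀ (by norm_num) hm
        _ = 2 ^ m := rfl
      have h3 : (3 : Int) ≤ 2 ^ (m + 1) - 1 := by
        rw [pow_succ]; omega
      have harg : PySem.Int.floordiv ((2 : Int) ^ (m + 1) - 1 - 1) 2 = 2 ^ m - 1 := by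
        rw [PySem.Int.floordiv_eq_ediv_of_pos (by norm_num)]
        have h2 : (2 : Int) ^ (m + 1) - 1 - 1 = (2 ^ m - 1) * 2 := by rw [pow_succ]; ring
        rw [h2, Int.mul_ediv_cancel _ (by norm_num)]
      have hsplit : PySem.List.pyRange 2 ((m : Int) + 1 + 1) 1 =
          PySem.List.pyRange 2 ((m : Int) + 1) 1 ++ PySem.List.pyRange ((m : Int) + 1) ((m : Int) + 1 + 1) 1 :=
        PySem.List.pyRange_one_append 2 ((m : Int) + 1) ((m : Int) + 1 + 1)
          (by omega) (by omega)
      have hlast : ((fun q : Int => (2 : Int) ^ q.toNat - 1) ((m : Int) + 1)) = 2 ^ (m + 1) - 1 := by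
        have ht : ((m : Int) + 1).toNat = m + 1 := by omega
        simp [ht]
      rw [pvDown, dif_pos h3, harg, ih]
      push_cast
      rw [hsplit, PySem.List.pyRange_one_singleton, List.map_append]
      simp only [List.map_cons, List.map_nil, hlast]
    · interval_cases m
      · rw [pvDown, dif_neg (by norm_num), PySem.List.pyRange_one_eq_nil (by norm_num)]
        rfl

-- ===== VERDICT (by name: the statement is the Claim_ definition above) =====
theorem get_stable_dimensions_spec : Claim_equal_get_stable_dimensions := by
  intro max_dim _
  unfold Spec_get_stable_dimensions get_stable_dimensions get_stable_dimensions_alt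
  show pvLoopA max_dim 2 =
    pvDown (PySem.Int.floordiv ((2 : Int) ^ Nat.size (max (max_dim + 1) 0).toNat) 2 - 1)
  have hA := pv_loop_eq max_dim (Nat.size (max (max_dim + 1) 0).toNat) 2 (by omega)
  rcases Nat.eq_zero_or_pos (Nat.size (max (max_dim + 1) 0).toNat) with h0 | hpos
  · rw [hA, h0, PySem.List.pyRange_one_eq_nil (by norm_num), pvDown, dif_neg (by decide)]
    rfl
  · obtain ⟨k, hk⟩ : ∃ k, Nat.size (max (max_dim + 1) 0).toNat = k + 1 :=
      ⟨Nat.size (max (max_dim + 1) 0).toNat - 1, by omega⟩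
    have htop : PySem.Int.floordiv ((2 : Int) ^ (k + 1)) 2 - 1 = 2 ^ k - 1 := by
      rw [PySem.Int.floordiv_eq_ediv_of_pos (by norm_num)]
      rw [pow_succ, Int.mul_ediv_cancel _ (by norm_num)]
    rw [hA, hk, htop, pv_down_pow k]
    norm_cast
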